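-- pv_equiv track=rewrite | github.com/SAURABHSALVE/ml-debug-rl-trainer | env/rl_agent.py | _history_to_flags
-- ===== SOURCE A (Python) =====
-- from typing import Any, Dict, List, Optional, Sequence, Tuple
--
-- def _history_to_flags(history: Sequence[str]) -> Dict[str, int]:
--     seen = {str(item).split("[", 1)[0] for item in history}
--     return {
--         "logs": int("fetch_logs" in seen),
--         "config": int("fetch_config" in seen),
--         "curve": int("fetch_loss_curve" in seen),
--         "diagnostics": int("fetch_diagnostics" in seen),
--         "class_data": int("fetch_class_data" in seen),
--     }
-- ===== SOURCE B (Python) =====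
-- _KEYS = [
--     ("logs", "fetch_logs"),
--     ("config", "fetch_config"),
--     ("curve", "fetch_loss_curve"),
--     ("diagnostics", "fetch_diagnostics"),
--     ("class_data", "fetch_class_data"),
-- ]
--
-- def _history_to_flags(history):
--     # One independent scan per flag; an item counts for a fetch name exactly when it
--     # IS that name or is that name followed by "[" (no split, no intermediate set).
--     return {
--         out: int(any(str(it) == name or str(it).startswith(name + "[") for it in history))
--         for out, name in _KEYS
--     }
-- ===== Notes on version B (the rewrite author's own statement) =====
-- stated objective: alternative
-- what changed: B drops the split-based prefix extraction and the intermediate set entirely: for each of the five flags it makes an independent any() scan testing whether an item equals the fetch name or starts with the name followed by '[' (five staged per-key scans vs A's single set-building pass plus membership tests).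
import Mathlib
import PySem

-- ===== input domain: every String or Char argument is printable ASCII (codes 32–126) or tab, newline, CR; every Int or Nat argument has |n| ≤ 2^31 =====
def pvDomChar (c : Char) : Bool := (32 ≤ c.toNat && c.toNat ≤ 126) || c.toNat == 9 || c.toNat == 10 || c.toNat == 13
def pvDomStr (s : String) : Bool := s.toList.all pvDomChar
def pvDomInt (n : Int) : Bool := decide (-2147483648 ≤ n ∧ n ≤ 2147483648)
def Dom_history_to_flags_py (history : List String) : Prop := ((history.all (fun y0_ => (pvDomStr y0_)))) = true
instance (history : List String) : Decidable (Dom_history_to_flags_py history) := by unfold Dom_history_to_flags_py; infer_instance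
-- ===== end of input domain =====

-- B replaces A's split-based prefix extraction plus intermediate set by five independent
-- any() scans testing item == name or item.startswith(name + "[") (objective: alternative).

-- ===== PORT A =====
-- str(item).split("[", 1)[0]  (split with sep "[" never returns an empty list, so the [0] index never raises; the .getD "" defaults are unreachable)
def pvPrefixOf (s : String) : String :=
  (PySem.List.pyGet? ((PySem.Str.splitMax? s "[" 1).getD []) 0).getD ""

def history_to_flags_py (history : List String) : List (String × Int) :=
  let seen : PySem.Set String := PySem.Set.ofList (history.map pvPrefixOf)
  [("logs", if PySem.Set.contains seen "fetch_logs" then (1 : Int) else 0),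
   ("config", if PySem.Set.contains seen "fetch_config" then (1 : Int) else 0),
   ("curve", if PySem.Set.contains seen "fetch_loss_curve" then (1 : Int) else 0),
   ("diagnostics", if PySem.Set.contains seen "fetch_diagnostics" then (1 : Int) else 0),
   ("class_data", if PySem.Set.contains seen "fetch_class_data" then (1 : Int) else 0)]

-- ===== PORT B =====
-- the module constant _KEYS
def pvKeys : List (String × String) :=
  [("logs", "fetch_logs"), ("config", "fetch_config"), ("curve", "fetch_loss_curve"),
   ("diagnostics", "fetch_diagnostics"), ("class_data", "fetch_class_data")]

-- the any(...) generator of B for one fetch name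
def pvHit (history : List String) (name : String) : Bool :=
  history.any (fun it => it == name || PySem.Str.startswith it (name ++ "["))

-- the dict comprehension over _KEYS: the five keys are distinct literals, so the dict's
-- items in insertion order are exactly this mapped list
def history_to_flags_py_alt (history : List String) : List (String × Int) :=
  pvKeys.map (fun kv => (kv.1, if pvHit history kv.2 then (1 : Int) else 0))

-- ===== PRECONDITION & SPEC =====
def Spec_history_to_flags_py (history : List String) (out : List (String × Int)) : Prop := out = history_to_flags_py_alt history
instance (history : List String) (out : List (String × Int)) : Decidable (Spec_history_to_flags_py history out) := by unfold Spec_history_to_flags_py; infer_instance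

-- ===== CLAIM (what is proved, stated in full; the proofs are below) =====
def Claim_equal_history_to_flags_py : Prop := ∀ (history : List String), Dom_history_to_flags_py history → Spec_history_to_flags_py history (history_to_flags_py history)

-- ===== LEMMAS AND PROOFS =====

-- the m = 0 tail of the split loop appends the whole remainder as one final piece
theorem pv_go_zero (sep : List Char) : ∀ (fuel : Nat) (l cur : List Char) (acc : List (List Char)),
    PySem.Chars.splitOnMax.go sep fuel 0 l cur acc = ((cur.reverse ++ l) :: acc).reverse := by
  intro fuel l cur acc
  cases fuel with
  | zero => simp [PySem.Chars.splitOnMax.go]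
  | succ n => cases l with
    | nil => simp [PySem.Chars.splitOnMax.go]
    | cons c rest => simp [PySem.Chars.splitOnMax.go]

-- with maxsplit 1 and sep "[", the first piece is the run of characters before the first '['
theorem pv_go_one_head : ∀ (fuel : Nat) (l cur : List Char), l.length < fuel →
    (PySem.Chars.splitOnMax.go ['['] fuel 1 l cur []).head?
      = some (cur.reverse ++ l.takeWhile (· != '[')) := by
  intro fuel
  induction fuel with
  | zero => intro l cur h; omega
  | succ n ih =>
    intro l cur h
    cases l with
    | nil => simp [PySem.Chars.splitOnMax.go]
    | cons c rest =>
      by_cases hc : c = '['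
      · subst hc
        simp only [PySem.Chars.splitOnMax.go]
        rw [if_neg (by norm_num), if_pos (by simp [List.isPrefixOf])]
        simp [pv_go_zero, List.takeWhile]
      · simp only [PySem.Chars.splitOnMax.go]
        rw [if_neg (by norm_num), if_neg (by simp [List.isPrefixOf]; exact fun h' => hc h'.symm)]
        rw [ih rest (c :: cur) (by simp at h ⊢; omega)]
        simp [hc]

-- pvPrefixOf computes the characters before the first '['
theorem pvPrefixOf_eq (s : String) :
    pvPrefixOf s = String.ofList (s.toList.takeWhile (· != '[')) := by
  unfold pvPrefixOf
  have hsep : ("[" : String).toList = ['['] := by decide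
  have h1 : PySem.Str.splitMax? s "[" 1
      = some ((PySem.Chars.splitOnMax.go ['['] (s.toList.length + 1) 1 s.toList [] []).map String.ofList) := by
    simp [PySem.Str.splitMax?, PySem.Chars.splitMax?, PySem.Chars.splitOnMax, hsep]
  rw [h1]
  have h2 := pv_go_one_head (s.toList.length + 1) s.toList [] (by omega)
  obtain ⟨x, t, hxt⟩ : ∃ x t, PySem.Chars.splitOnMax.go ['['] (s.toList.length + 1) 1 s.toList [] [] = x :: t := by
    cases hgo : PySem.Chars.splitOnMax.go ['['] (s.toList.length + 1) 1 s.toList [] [] with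
    | nil => rw [hgo] at h2; simp at h2
    | cons x t => exact ⟨x, t, rfl⟩
  rw [hxt] at h2 ⊢
  simp at h2
  simp [PySem.List.pyGet?, PySem.List.pyIdx?, h2]

-- the element a dropWhile stops at fails the predicate
theorem pv_dropWhile_head {α : Type} (p : α → Bool) : ∀ (l : List α) (c : α) (rest : List α),
    l.dropWhile p = c :: rest → p c = false := by
  intro l
  induction l with
  | nil => intro c rest h; simp at h
  | cons a l ih =>
    intro c rest h
    by_cases hp : p a = true
    · rw [List.dropWhile_cons_of_pos hp] at h; exact ih c rest h
    · rw [List.dropWhile_cons_of_neg hp] at h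
      cases h
      simpa using hp

-- characterisation with no split: prefix-before-'[' equals P (P itself '['-free)
-- iff the string IS P or starts with P followed by '['
theorem pv_take_char (t P : List Char) (hP : '[' ∉ P) :
    t.takeWhile (· != '[') = P ↔ (t = P ∨ (P ++ ['[']) <+: t) := by
  constructor
  · intro h
    have hsplit : t = P ++ t.dropWhile (· != '[') := by
      conv_lhs => rw [← List.takeWhile_append_dropWhile (p := (· != '[')) (l := t)]
      rw [h]
    cases hd : t.dropWhile (· != '[') with
    | nil => left; rw [hsplit, hd]; simp
    | cons c rest =>
      have hc : (c != '[') = false := pv_dropWhile_head _ _ c rest hd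
      have hc' : c = '[' := by simpa using hc
      right
      refine ⟨rest, ?_⟩
      rw [hsplit, hd, hc']
      simp
  · intro h
    cases h with
    | inl h =>
      subst h
      rw [List.takeWhile_eq_self_iff]
      intro c hc
      simp only [bne_iff_ne, ne_eq]
      intro hcc; exact hP (hcc ▸ hc)
    | inr h =>
      obtain ⟨rest, hrest⟩ := h
      rw [← hrest]
      have hself : P.takeWhile (· != '[') = P := by
        rw [List.takeWhile_eq_self_iff]
        intro c hc
        simp only [bne_iff_ne, ne_eq]
        intro hcc; exact hP (hcc ▸ hc)
      rw [List.append_assoc, List.takeWhile_append, if_pos (by rw [hself])]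
      simp

-- A's membership test for one fetch name equals B's any() scan
theorem pv_flag_eq (history : List String) (p : String) (hP : '[' ∉ p.toList) :
    PySem.Set.contains (PySem.Set.ofList (history.map pvPrefixOf)) p
      = pvHit history p := by
  rw [Bool.eq_iff_iff]
  rw [PySem.Set.contains_iff]
  rw [PySem.Set.mem_ofList]
  unfold pvHit
  rw [List.any_eq_true]
  simp only [List.mem_map, Bool.or_eq_true, beq_iff_eq]
  constructor
  · rintro ⟨it, hit, hpre⟩
    refine ⟨it, hit, ?_⟩
    rw [pvPrefixOf_eq] at hpre
    have : it.toList.takeWhile (· != '[') = p.toList := by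
      have h' := congrArg String.toList hpre
      simpa using h' 
    rcases (pv_take_char it.toList p.toList hP).mp this with h | h
    · left; exact String.toList_injective (by simpa using h)
    · right
      simp only [PySem.Str.startswith_eq]
      rw [PySem.Chars.startswith_iff]
      simpa [String.toList_append] using h
  · rintro ⟨it, hit, hcase⟩
    refine ⟨it, hit, ?_⟩
    rw [pvPrefixOf_eq]
    have : it.toList.takeWhile (· != '[') = p.toList := by
      apply (pv_take_char it.toList p.toList hP).mpr
      cases hcase with
      | inl h => left; rw [h]
      | inr h =>
        right
        simp only [PySem.Str.startswith_eq] at h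
        rw [PySem.Chars.startswith_iff] at h
        simpa [String.toList_append] using h
    rw [this, String.ofList_toList]

-- ===== VERDICT (by name: the statement is the Claim_ definition above) =====
theorem history_to_flags_py_spec : Claim_equal_history_to_flags_py := by
  intro history _
  unfold Spec_history_to_flags_py history_to_flags_py history_to_flags_py_alt pvKeys
  simp only [List.map]
  rw [pv_flag_eq history "fetch_logs" (by decide),
      pv_flag_eq history "fetch_config" (by decide),
      pv_flag_eq history "fetch_loss_curve" (by decide),
      pv_flag_eq history "fetch_diagnostics" (by decide),
      pv_flag_eq history "fetch_class_data" (by decide)]
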